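-- pv_equiv track=rewrite | github.com/nwthomas/code-challenges | src/miscellaneous-code-challenges/cd/cd.py | get_symlinked_path
-- ===== SOURCE A (Python) =====
-- def get_symlinked_path(current_path: str, symlinks: dict[str, str]) -> str:
--     visited = set[str]()
--
--     current = current_path
--     while current in symlinks:
--         if current in visited:
--             return current_path
--         visited.add(current)
--         current = symlinks[current]
--
--     return current
-- ===== SOURCE B (Python) =====
-- def get_symlinked_path(current_path: str, symlinks: dict[str, str]) -> str:
--     node = current_path
--     for _ in range(len(symlinks) + 1):
--         node = symlinks.get(node, node)
--     return current_path if node in symlinks else node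
-- ===== Notes on version B (the rewrite author's own statement) =====
-- stated objective: alternative
-- what changed: Replaces A's while-loop with a visited set and early returns by an unconditional fixed-count fixpoint iteration: apply the totalized step x -> symlinks.get(x, x) exactly len(symlinks)+1 times (the terminal node is a fixpoint of this step), then one final test decides the result: return the final node if it is not a key, else current_path (a cycle was entered).
import Mathlib
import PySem

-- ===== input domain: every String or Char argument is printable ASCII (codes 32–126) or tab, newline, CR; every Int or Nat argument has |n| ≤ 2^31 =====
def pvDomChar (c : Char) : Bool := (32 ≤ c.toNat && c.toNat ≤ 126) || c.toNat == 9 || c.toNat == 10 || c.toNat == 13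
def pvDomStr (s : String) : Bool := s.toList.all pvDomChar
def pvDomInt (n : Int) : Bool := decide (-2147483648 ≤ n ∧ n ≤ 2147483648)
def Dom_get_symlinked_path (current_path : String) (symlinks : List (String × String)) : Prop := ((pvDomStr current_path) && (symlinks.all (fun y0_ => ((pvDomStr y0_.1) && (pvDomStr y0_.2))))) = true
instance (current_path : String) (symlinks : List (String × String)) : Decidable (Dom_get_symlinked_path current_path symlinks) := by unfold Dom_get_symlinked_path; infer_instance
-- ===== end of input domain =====

-- B replaces A's visited-set while-loop by a fixed-count fixpoint iteration: it applies the
-- totalized step x ↦ symlinks.get(x, x) exactly len(symlinks)+1 times, then one final key test;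
-- objective: alternative (same O(n) time, no visited set, O(1) extra space).

-- ===== PORT A =====
-- A's while-loop with a visited set, made total by a fuel guard: fuel = symlinks.length + 1
-- strictly exceeds the number of loop iterations Python A can perform (each completed
-- iteration adds a distinct key to `visited`), so the fuel-0 branch is never reached.
def pvGoA (current_path : String) (symlinks : List (String × String)) :
    Nat → PySem.Set String → String → String
  | 0, _, _ => current_path
  | Nat.succ f, visited, current =>
    match PySem.Dict.get? (PySem.Dict.mk symlinks) current with
    | none => current
    | some nxt =>
      if PySem.Set.contains visited current then current_path
      else pvGoA current_path symlinks f (PySem.Set.add visited current) nxt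

def get_symlinked_path (current_path : String) (symlinks : List (String × String)) : String :=
  pvGoA current_path symlinks (symlinks.length + 1) PySem.Set.empty current_path

-- ===== PORT B =====
-- B's for-loop: apply the total step node ↦ symlinks.get(node, node) len(symlinks)+1 times
-- (no early exit, no membership test inside the loop), then one final key test.
def get_symlinked_path_alt (current_path : String) (symlinks : List (String × String)) : String :=
  let node := (List.range (symlinks.length + 1)).foldl
    (fun cur _ => PySem.Dict.getD (PySem.Dict.mk symlinks) cur cur) current_path
  if PySem.Dict.contains (PySem.Dict.mk symlinks) node then current_path else node

-- ===== PRECONDITION & SPEC =====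
def Spec_get_symlinked_path (current_path : String) (symlinks : List (String × String)) (out : String) : Prop := out = get_symlinked_path_alt current_path symlinks
instance (current_path : String) (symlinks : List (String × String)) (out : String) : Decidable (Spec_get_symlinked_path current_path symlinks out) := by unfold Spec_get_symlinked_path; infer_instance

-- ===== CLAIM =====
def Claim_equal_get_symlinked_path : Prop := ∀ (current_path : String) (symlinks : List (String × String)), Dom_get_symlinked_path current_path symlinks → Spec_get_symlinked_path current_path symlinks (get_symlinked_path current_path symlinks)

-- ===== LEMMAS AND PROOFS =====

-- B's totalized step function.
def pvStep (symlinks : List (String × String)) (cur : String) : String :=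
  PySem.Dict.getD (PySem.Dict.mk symlinks) cur cur

-- n-step iteration of the PARTIAL link map; `some d` means all n sources on the way were keys.
def pvIter (symlinks : List (String × String)) : Nat → String → Option String
  | 0, c => some c
  | Nat.succ n, c =>
    match PySem.Dict.get? (PySem.Dict.mk symlinks) c with
    | none => none
    | some nxt => pvIter symlinks n nxt

theorem pvGoA_succ (current_path : String) (symlinks : List (String × String))
    (f : Nat) (visited : PySem.Set String) (cur : String) :
    pvGoA current_path symlinks (f + 1) visited cur =
      match PySem.Dict.get? (PySem.Dict.mk symlinks) cur with
      | none => cur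
      | some nxt =>
        if PySem.Set.contains visited cur then current_path
        else pvGoA current_path symlinks f (PySem.Set.add visited cur) nxt := rfl

theorem pvFoldlRange (g : String → String) (x : String) :
    ∀ m, (List.range m).foldl (fun c _ => g c) x = g^[m] x := by
  intro m
  induction m with
  | zero => simp
  | succ k ih =>
    rw [List.range_succ, List.foldl_append, ih, Function.iterate_succ_apply']
    rfl

theorem pvStep_of_some (symlinks : List (String × String)) (cur nxt : String)
    (h : PySem.Dict.get? (PySem.Dict.mk symlinks) cur = some nxt) :
    pvStep symlinks cur = nxt := by
  simp [pvStep, PySem.Dict.getD_eq_get?_getD, h]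

theorem pvStep_of_none (symlinks : List (String × String)) (cur : String)
    (h : PySem.Dict.get? (PySem.Dict.mk symlinks) cur = none) :
    pvStep symlinks cur = cur := by
  simp [pvStep, PySem.Dict.getD_eq_get?_getD, h]

-- a terminal node is a fixpoint of the totalized step
theorem pvIterate_fix (symlinks : List (String × String)) (cur : String)
    (h : PySem.Dict.get? (PySem.Dict.mk symlinks) cur = none) :
    ∀ m, (pvStep symlinks)^[m] cur = cur := by
  intro m
  induction m with
  | zero => rfl
  | succ k ih => rw [Function.iterate_succ_apply', ih, pvStep_of_none _ _ h]

theorem pvIter_succ_right (symlinks : List (String × String)) (n : Nat) (c : String) :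
    pvIter symlinks (n + 1) c =
      match pvIter symlinks n c with
      | none => none
      | some d =>
        match PySem.Dict.get? (PySem.Dict.mk symlinks) d with
        | none => none
        | some e => some e := by
  induction n generalizing c with
  | zero => simp [pvIter]
  | succ m ih =>
    show pvIter symlinks (m + 2) c = _
    cases h : PySem.Dict.get? (PySem.Dict.mk symlinks) c with
    | none => simp [pvIter, h]
    | some nxt => simp only [pvIter, h]; exact ih nxt

-- if `cur` lies on a cycle of keys, every iterate of the totalized step is again a key
theorem pvCyclePump (symlinks : List (String × String)) (cur : String) (j : Nat)
    (hcyc : pvIter symlinks (j + 1) cur = some cur) :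
    ∀ m, (PySem.Dict.get? (PySem.Dict.mk symlinks) ((pvStep symlinks)^[m] cur)).isSome := by
  intro m
  induction m generalizing cur j with
  | zero =>
    cases hg : PySem.Dict.get? (PySem.Dict.mk symlinks) cur with
    | none => simp [pvIter, hg] at hcyc
    | some nxt => simp [hg]
  | succ k ih =>
    cases hg : PySem.Dict.get? (PySem.Dict.mk symlinks) cur with
    | none => simp [pvIter, hg] at hcyc
    | some nxt =>
      have hrest : pvIter symlinks j nxt = some cur := by
        simpa [pvIter, hg] using hcyc
      have hcyc' : pvIter symlinks (j + 1) nxt = some nxt := by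
        rw [pvIter_succ_right]; simp [hrest, hg]
      rw [Function.iterate_succ_apply, pvStep_of_some _ _ _ hg]
      exact ih nxt j hcyc'

-- a successful lookup means the string is among the list's keys
theorem pvMemKeys (symlinks : List (String × String)) (k : String)
    (h : (PySem.Dict.get? (PySem.Dict.mk symlinks) k).isSome) : k ∈ symlinks.map Prod.fst := by
  induction symlinks with
  | nil => simp [PySem.Dict.get?] at h
  | cons p rest ih =>
    rw [PySem.Dict.get?_mk_cons] at h
    by_cases he : p.1 == k
    · simp only [List.map_cons, List.mem_cons]
      exact Or.inl (eq_of_beq he).symm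
    · simp only [he, Bool.false_eq_true, if_false] at h
      exact List.mem_cons_of_mem _ (ih h)

-- counting: a duplicate-free list of keys of `symlinks` is no longer than `symlinks`
theorem pvCount (symlinks : List (String × String)) (l : List String) (hnd : l.Nodup)
    (hmem : ∀ v ∈ l, (PySem.Dict.get? (PySem.Dict.mk symlinks) v).isSome) :
    l.length ≤ symlinks.length := by
  have hsub : l.toFinset ⊆ (symlinks.map Prod.fst).toFinset := by
    intro x hx
    rw [List.mem_toFinset] at hx ⊢
    exact pvMemKeys symlinks x (hmem x hx)
  calc l.length = l.toFinset.card := (List.toFinset_card_of_nodup hnd).symm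
    _ ≤ (symlinks.map Prod.fst).toFinset.card := Finset.card_le_card hsub
    _ ≤ (symlinks.map Prod.fst).length := List.toFinset_card_le _
    _ = symlinks.length := List.length_map _

-- main lockstep induction. Invariants: every visited node reaches `cur` in ≥ 1 key-steps
-- (for the revisit branch), visited is duplicate-free and consists of keys, and the fuel
-- plus the number of visited nodes still covers all keys (so A's fuel never runs out).
theorem pvGoA_eq_iterate (current_path : String) (symlinks : List (String × String)) :
    ∀ fuel (visited : PySem.Set String) cur,
      (∀ v ∈ (visited : List String), ∃ j, pvIter symlinks (j + 1) v = some cur) →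
      (visited : List String).Nodup →
      (∀ v ∈ (visited : List String), (PySem.Dict.get? (PySem.Dict.mk symlinks) v).isSome) →
      symlinks.length + 1 ≤ fuel + 1 + (visited : List String).length →
      pvGoA current_path symlinks (fuel + 1) visited cur =
        (if (PySem.Dict.contains (PySem.Dict.mk symlinks) ((pvStep symlinks)^[fuel + 1] cur)) then
          current_path else (pvStep symlinks)^[fuel + 1] cur) := by
  intro fuel
  induction fuel with
  | zero =>
    intro visited cur hreach hnd hkeys hlen
    cases hg : PySem.Dict.get? (PySem.Dict.mk symlinks) cur with
    | none =>
      rw [pvGoA_succ, pvIterate_fix symlinks cur hg (0 + 1), PySem.Dict.contains_eq_isSome_get?, hg]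
      simp
    | some nxt =>
      by_cases hv : PySem.Set.contains visited cur = true
      · have hmem : cur ∈ (visited : List String) := by
          have := PySem.Set.contains_iff (s := visited) (x := cur)
          exact this.mp hv
        obtain ⟨j, hj⟩ := hreach cur hmem
        have hs : PySem.Dict.contains (PySem.Dict.mk symlinks) ((pvStep symlinks)^[0 + 1] cur) = true := by
          rw [PySem.Dict.contains_eq_isSome_get?]
          simpa using pvCyclePump symlinks cur j hj 1
        rw [pvGoA_succ]
        simp only [hg, hv, hs, if_true]
      · -- unreachable: cur together with visited would be symlinks.length + 1 distinct keys
        exfalso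
        have hnd' : (cur :: (visited : List String)).Nodup := by
          refine List.nodup_cons.mpr ⟨?_, hnd⟩
          intro hc
          have := PySem.Set.contains_iff (s := visited) (x := cur)
          exact hv (this.mpr hc)
        have hkeys' : ∀ v ∈ (cur :: (visited : List String)),
            (PySem.Dict.get? (PySem.Dict.mk symlinks) v).isSome := by
          intro v hvmem
          rcases List.mem_cons.mp hvmem with h | h
          · subst h; simp [hg]
          · exact hkeys v h
        have := pvCount symlinks _ hnd' hkeys'
        simp only [List.length_cons] at this
        omega
  | succ f ih =>
    intro visited cur hreach hnd hkeys hlen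
    cases hg : PySem.Dict.get? (PySem.Dict.mk symlinks) cur with
    | none =>
      rw [pvGoA_succ, pvIterate_fix symlinks cur hg (f + 1 + 1), PySem.Dict.contains_eq_isSome_get?, hg]
      simp
    | some nxt =>
      by_cases hv : PySem.Set.contains visited cur = true
      · have hmem : cur ∈ (visited : List String) := by
          have := PySem.Set.contains_iff (s := visited) (x := cur)
          exact this.mp hv
        obtain ⟨j, hj⟩ := hreach cur hmem
        have hs : PySem.Dict.contains (PySem.Dict.mk symlinks) ((pvStep symlinks)^[f + 1 + 1] cur) = true := by
          rw [PySem.Dict.contains_eq_isSome_get?]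
          simpa using pvCyclePump symlinks cur j hj (f + 2)
        rw [pvGoA_succ]
        simp only [hg, hv, hs, if_true]
      · have hne : cur ∉ (visited : List String) := by
          intro hc
          have := PySem.Set.contains_iff (s := visited) (x := cur)
          exact hv (this.mpr hc)
        have hadd : (PySem.Set.add visited cur : List String) = (visited : List String) ++ [cur] := by
          simp [PySem.Set.add, hne]
        have step : (pvStep symlinks)^[f + 1 + 1] cur = (pvStep symlinks)^[f + 1] nxt := by
          rw [Function.iterate_succ_apply, pvStep_of_some _ _ _ hg]
        have lhs : pvGoA current_path symlinks (f + 1 + 1) visited cur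
            = pvGoA current_path symlinks (f + 1) (PySem.Set.add visited cur) nxt := by
          rw [pvGoA_succ]
          simp only [hg]
          exact if_neg hv
        rw [lhs, step]
        apply ih
        · intro v hvmem
          rw [hadd] at hvmem
          rcases List.mem_append.mp hvmem with h | h
          · obtain ⟨j, hj⟩ := hreach v h
            refine ⟨j + 1, ?_⟩
            rw [pvIter_succ_right]
            simp [hj, hg]
          · refine ⟨0, ?_⟩
            simp only [List.mem_singleton] at h
            simp [pvIter, hg, h]
        · rw [hadd]
          refine List.Nodup.append hnd (List.nodup_singleton cur) ?_
          simpa [List.disjoint_singleton] using hne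
        · intro v hvmem
          rw [hadd] at hvmem
          rcases List.mem_append.mp hvmem with h | h
          · exact hkeys v h
          · simp only [List.mem_singleton] at h
            subst h; simp [hg]
        · rw [hadd]
          simp only [List.length_append, List.length_singleton]
          omega

-- ===== VERDICT =====
theorem get_symlinked_path_spec : Claim_equal_get_symlinked_path := by
  intro current_path symlinks _
  unfold Spec_get_symlinked_path get_symlinked_path get_symlinked_path_alt
  rw [pvFoldlRange]
  have := pvGoA_eq_iterate current_path symlinks symlinks.length PySem.Set.empty current_path
    (by intro v hv; simp [PySem.Set.empty] at hv)
    (by simp [PySem.Set.empty])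
    (by intro v hv; simp [PySem.Set.empty] at hv)
    (by simp [PySem.Set.empty])
  simpa [pvStep] using this
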